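-- pv_equiv track=rewrite | github.com/williamfhe/advent-of-code-2023 | Day_14/part_2.py | find_place_for_rock_north
-- ===== SOURCE A (Python) =====
-- PLATFORM_TYPE = list[list[str]]
--
-- def find_place_for_rock_north(
--     platform: PLATFORM_TYPE, rock_row: int, rock_col: int
-- ) -> int:
--     best_row = rock_row
--     for r in range(rock_row - 1, -1, -1):
--         if platform[r][rock_col] == ".":
--             best_row = r
--         else:
--             break
--
--     return best_row
-- ===== SOURCE B (Python) =====
-- def find_place_for_rock_north(platform, rock_row, rock_col):
--     # Build the index list of all blocked cells in the column above the rock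
--     # in one full pass, then read the answer off its last element.
--     obstacles = [r for r in range(rock_row) if platform[r][rock_col] != "."]
--     top = obstacles[-1] + 1 if obstacles else 0
--     # a rock never moves down, so its destination is at most its current row
--     return min(rock_row, top)
-- ===== Notes on version B (the rewrite author's own statement) =====
-- stated objective: alternative
-- what changed: Replaces A's upward early-break walk by a full-column pass that collects the indices of all obstacles above the rock and reads the resting row off the last collected index (clamped by the rock's own row).
-- outside the precondition, e.g. on find_place_for_rock_north([[], ['#'], ['.']], 3, 0): A returns 2, B raises IndexError
import Mathlib
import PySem

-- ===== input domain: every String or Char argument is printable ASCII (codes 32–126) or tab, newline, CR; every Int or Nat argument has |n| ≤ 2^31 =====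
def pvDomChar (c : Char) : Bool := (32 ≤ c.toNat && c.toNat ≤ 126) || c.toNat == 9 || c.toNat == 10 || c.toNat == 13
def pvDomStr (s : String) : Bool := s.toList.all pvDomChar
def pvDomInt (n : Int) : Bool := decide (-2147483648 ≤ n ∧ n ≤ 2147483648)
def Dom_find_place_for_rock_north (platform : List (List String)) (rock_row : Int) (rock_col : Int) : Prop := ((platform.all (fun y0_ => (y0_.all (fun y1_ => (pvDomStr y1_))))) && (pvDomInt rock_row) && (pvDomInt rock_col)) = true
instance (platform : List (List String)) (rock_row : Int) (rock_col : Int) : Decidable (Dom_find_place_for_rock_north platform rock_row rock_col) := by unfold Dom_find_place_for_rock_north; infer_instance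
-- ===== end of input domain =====

-- B replaces A's upward early-break walk by one full pass collecting the obstacle
-- indices of the whole column above the rock, reading the answer off the last one
-- (objective: alternative decomposition, same cost).

-- ===== PORT A =====
-- the early-break walk of A: for r in range(rock_row-1, -1, -1): … break
def pvA_scan (platform : List (List String)) (rock_col : Int) : List Int → Int → Int
  | [], best => best
  | r :: rs, best =>
    match (PySem.List.pyGet? platform r).bind (fun row => PySem.List.pyGet? row rock_col) with
    | some cell => if cell = "." then pvA_scan platform rock_col rs r else best
    | none => best   -- IndexError in Python; unreachable under Pre_

def find_place_for_rock_north (platform : List (List String)) (rock_row : Int) (rock_col : Int) : Int :=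
  pvA_scan platform rock_col (PySem.List.pyRange (rock_row - 1) (-1) (-1)) rock_row

-- ===== PORT B =====
-- Python: platform[r][rock_col] != "."  (true branch of the comprehension filter)
def pvObst (platform : List (List String)) (rock_col : Int) (r : Int) : Bool :=
  match (PySem.List.pyGet? platform r).bind (fun row => PySem.List.pyGet? row rock_col) with
  | some cell => cell != "."
  | none => true   -- IndexError in Python; unreachable under Pre_

def find_place_for_rock_north_alt (platform : List (List String)) (rock_row : Int) (rock_col : Int) : Int :=
  let obstacles := (PySem.List.pyRange 0 rock_row 1).filter (pvObst platform rock_col)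
  let top := match obstacles.getLast? with
    | some m => m + 1
    | none => 0
  min rock_row top

-- ===== PRECONDITION & SPEC =====
-- Pre_ requires every row of the column above the rock to admit the (possibly negative)
-- index rock_col; A's early break can return on ragged platforms whose higher rows are
-- too short, where B's full column pass raises IndexError — those inputs are excluded.
def Pre_find_place_for_rock_north (platform : List (List String)) (rock_row : Int) (rock_col : Int) : Prop :=
  rock_row ≤ platform.length ∧
  ∀ r : Nat, r < rock_row.toNat →
    ((PySem.List.pyGet? platform (r : Int)).bind (fun row => PySem.List.pyGet? row rock_col)) ≠ none
instance (platform : List (List String)) (rock_row : Int) (rock_col : Int) : Decidable (Pre_find_place_for_rock_north platform rock_row rock_col) := by unfold Pre_find_place_for_rock_north; infer_instance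

def pvWitness_find_place_for_rock_north : List (List String) × Int × Int := ([[".", "#"], ["."]], 1, 0)

def Spec_find_place_for_rock_north (platform : List (List String)) (rock_row : Int) (rock_col : Int) (out : Int) : Prop := out = find_place_for_rock_north_alt platform rock_row rock_col
instance (platform : List (List String)) (rock_row : Int) (rock_col : Int) (out : Int) : Decidable (Spec_find_place_for_rock_north platform rock_row rock_col out) := by unfold Spec_find_place_for_rock_north; infer_instance

-- ===== CLAIM (what is proved, stated in full; the proofs are below) =====
def Claim_equal_find_place_for_rock_north : Prop := ∀ (platform : List (List String)) (rock_row : Int) (rock_col : Int), Dom_find_place_for_rock_north platform rock_row rock_col → Pre_find_place_for_rock_north platform rock_row rock_col → Spec_find_place_for_rock_north platform rock_row rock_col (find_place_for_rock_north platform rock_row rock_col)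

-- ===== LEMMAS AND PROOFS =====

-- the value B reads off the obstacle list of the column prefix [0, k)
def pvTop (platform : List (List String)) (rock_col : Int) (k : Nat) : Int :=
  match ((PySem.List.pyRange 0 (k : Int) 1).filter (pvObst platform rock_col)).getLast? with
  | some m => m + 1
  | none => 0

lemma pvTop_le (platform : List (List String)) (rock_col : Int) (k : Nat) :
    pvTop platform rock_col k ≤ (k : Int) := by
  unfold pvTop
  cases h : ((PySem.List.pyRange 0 (k : Int) 1).filter (pvObst platform rock_col)).getLast? with
  | none => simp
  | some m =>
    have hm : m ∈ (PySem.List.pyRange 0 (k : Int) 1).filter (pvObst platform rock_col) :=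
      List.mem_of_getLast? h
    have := (PySem.List.mem_pyRange_one.mp (List.mem_of_mem_filter hm)).2
    simpa using this

lemma pvTop_succ (platform : List (List String)) (rock_col : Int) (k : Nat) :
    pvTop platform rock_col (k + 1) =
      if pvObst platform rock_col (k : Int) then (k : Int) + 1
      else pvTop platform rock_col k := by
  unfold pvTop
  have hsplit : PySem.List.pyRange 0 ((k : Int) + 1) 1
      = PySem.List.pyRange 0 (k : Int) 1 ++ [(k : Int)] :=
    PySem.List.pyRange_one_succ_right (by positivity)
  have hcast : ((k + 1 : Nat) : Int) = (k : Int) + 1 := by push_cast; ring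
  rw [hcast, hsplit, List.filter_append]
  by_cases hk : pvObst platform rock_col (k : Int)
  · simp [hk]
  · simp [hk]

lemma pvA_scan_spec (platform : List (List String)) (rock_col : Int) (rock_row : Int)
    (hvalid : ∀ r : Nat, r < rock_row.toNat →
      ((PySem.List.pyGet? platform (r : Int)).bind (fun row => PySem.List.pyGet? row rock_col)) ≠ none) :
    ∀ k : Nat, k ≤ rock_row.toNat →
      pvA_scan platform rock_col (PySem.List.pyRange ((k : Int) - 1) (-1) (-1)) (k : Int)
        = pvTop platform rock_col k := by
  intro k
  induction k with
  | zero =>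
    intro _
    rw [PySem.List.pyRange_neg_one_eq_nil (by norm_num)]
    unfold pvTop
    rw [PySem.List.pyRange_one_eq_nil (by norm_num)]
    simp [pvA_scan]
  | succ k ih =>
    intro hk
    have hcast : ((k + 1 : Nat) : Int) - 1 = (k : Int) := by push_cast; ring
    rw [hcast, PySem.List.pyRange_neg_one_cons (by omega)]
    have hvk := hvalid k (by omega)
    obtain ⟨cell, hcell⟩ : ∃ c, ((PySem.List.pyGet? platform (k : Int)).bind (fun row => PySem.List.pyGet? row rock_col)) = some c := by
      cases h : ((PySem.List.pyGet? platform (k : Int)).bind (fun row => PySem.List.pyGet? row rock_col)) with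
      | none => exact absurd h hvk
      | some c => exact ⟨c, rfl⟩
    rw [pvTop_succ]
    by_cases hdot : cell = "."
    · have hobst : pvObst platform rock_col (k : Int) = false := by
        unfold pvObst; rw [hcell]; simp [hdot]
      rw [hobst]
      simp only [pvA_scan, hcell, if_pos hdot, Bool.false_eq_true, if_false]
      have hkle : k ≤ rock_row.toNat := by omega
      have hdec : ((k : Int) - 1) = ((k : Nat) : Int) - 1 := rfl
      exact ih hkle
    · have hobst : pvObst platform rock_col (k : Int) = true := by
        unfold pvObst; rw [hcell]; simp [hdot]
      rw [hobst]
      simp only [pvA_scan, hcell, if_neg hdot, if_true]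
      push_cast; ring

-- ===== VERDICT (by name: the statement is the Claim_ definition above) =====
theorem find_place_for_rock_north_spec : Claim_equal_find_place_for_rock_north := by
  intro platform rock_row rock_col _ hpre
  unfold Spec_find_place_for_rock_north
  unfold find_place_for_rock_north find_place_for_rock_north_alt
  obtain ⟨hlen, hvalid⟩ := hpre
  by_cases h0 : rock_row ≤ 0
  · rw [PySem.List.pyRange_neg_one_eq_nil (by omega), PySem.List.pyRange_one_eq_nil h0]
    simp [pvA_scan]
    omega
  · obtain ⟨n, rfl⟩ : ∃ n : Nat, rock_row = (n : Int) := ⟨rock_row.toNat, by omega⟩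
    have hvalid' : ∀ r : Nat, r < n →
        ((PySem.List.pyGet? platform (r : Int)).bind (fun row => PySem.List.pyGet? row rock_col)) ≠ none := by
      intro r hr; exact hvalid r (by simpa using hr)
    have hmain := pvA_scan_spec platform rock_col (n : Int) (by simpa using hvalid') n (by simp)
    rw [hmain]
    have hle := pvTop_le platform rock_col n
    simpa [pvTop] using (min_eq_right hle).symm
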